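-- pv_equiv track=rewrite | github.com/breakingballz/advent-of-code-2021 | day5/main.py | get_diagonal_path
-- ===== SOURCE A (Python) =====
-- COORD = tuple[int, int]
--
-- PAIR = tuple[COORD, COORD]
--
-- def get_diagonal_path(pair: PAIR) -> list[COORD]:
--     coord1, coord2 = pair
--     x_incr = 1 if coord1[0] < coord2[0] else -1
--     y_incr = 1 if coord1[1] < coord2[1] else -1
--
--     return [
--         (coord1[0] + i * x_incr, coord1[1] + i * y_incr)
--         for i in range(0, abs(coord1[0] - coord2[0]) + 1)
--     ]
-- ===== SOURCE B (Python) =====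
-- COORD = tuple[int, int]
--
-- PAIR = tuple[COORD, COORD]
--
-- def get_diagonal_path(pair: PAIR) -> list[COORD]:
--     coord1, coord2 = pair
--     x_incr = 1 if coord1[0] < coord2[0] else -1
--     y_incr = 1 if coord1[1] < coord2[1] else -1
--     x, y = coord1
--     result = []
--     while True:
--         result.append((x, y))
--         if x == coord2[0]:
--             break
--         x += x_incr
--         y += y_incr
--     return result
-- ===== Notes on version B (the rewrite author's own statement) =====
-- stated objective: alternative
-- what changed: Replaces the precomputed-count comprehension indexed by i with a state-threading loop that walks (x, y) from coord1 and stops on reaching coord2's x-coordinate.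
import Mathlib
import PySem

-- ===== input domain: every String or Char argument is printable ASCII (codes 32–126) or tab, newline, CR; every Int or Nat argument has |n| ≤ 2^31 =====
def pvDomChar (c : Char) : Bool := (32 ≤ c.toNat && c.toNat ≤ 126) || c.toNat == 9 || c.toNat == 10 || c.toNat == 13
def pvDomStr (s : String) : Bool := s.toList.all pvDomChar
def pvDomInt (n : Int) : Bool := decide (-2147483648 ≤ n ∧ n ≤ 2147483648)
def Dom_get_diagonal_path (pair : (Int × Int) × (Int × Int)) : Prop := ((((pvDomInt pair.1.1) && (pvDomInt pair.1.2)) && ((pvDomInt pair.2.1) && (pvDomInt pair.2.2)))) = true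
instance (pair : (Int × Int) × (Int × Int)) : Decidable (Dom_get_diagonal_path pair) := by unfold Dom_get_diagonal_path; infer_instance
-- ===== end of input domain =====

-- B replaces A's precomputed-count comprehension by a state-threading loop that walks
-- (x, y) from coord1 and stops on reaching coord2's x-coordinate (alternative decomposition).

-- ===== PORT A =====
def get_diagonal_path (pair : (Int × Int) × (Int × Int)) : List (Int × Int) :=
  let coord1 := pair.1
  let coord2 := pair.2
  let x_incr : Int := if coord1.1 < coord2.1 then 1 else -1
  let y_incr : Int := if coord1.2 < coord2.2 then 1 else -1
  (PySem.List.pyRange 0 ((coord1.1 - coord2.1).natAbs + 1) 1).map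
    (fun i => (coord1.1 + i * x_incr, coord1.2 + i * y_incr))

-- ===== PORT B =====
-- the 'while True' loop of Source B; fuel bounds the iterations (the loop body runs at
-- most |x1 - x2| + 1 times since x steps by ±1 toward coord2's x before the break)
def pvAltLoop (fuel : Nat) (x2 x_incr y_incr x y : Int) : List (Int × Int) :=
  match fuel with
  | 0 => []
  | fuel + 1 =>
    if x = x2 then [(x, y)]
    else (x, y) :: pvAltLoop fuel x2 x_incr y_incr (x + x_incr) (y + y_incr)

def get_diagonal_path_alt (pair : (Int × Int) × (Int × Int)) : List (Int × Int) :=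
  let coord1 := pair.1
  let coord2 := pair.2
  let x_incr : Int := if coord1.1 < coord2.1 then 1 else -1
  let y_incr : Int := if coord1.2 < coord2.2 then 1 else -1
  pvAltLoop ((coord1.1 - coord2.1).natAbs + 1) coord2.1 x_incr y_incr coord1.1 coord1.2

-- ===== PRECONDITION & SPEC =====
def Spec_get_diagonal_path (pair : (Int × Int) × (Int × Int)) (out : List (Int × Int)) : Prop := out = get_diagonal_path_alt pair
instance (pair : (Int × Int) × (Int × Int)) (out : List (Int × Int)) : Decidable (Spec_get_diagonal_path pair out) := by unfold Spec_get_diagonal_path; infer_instance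

-- ===== CLAIM (what is proved, stated in full; the proofs are below) =====
def Claim_equal_get_diagonal_path : Prop := ∀ (pair : (Int × Int) × (Int × Int)), Dom_get_diagonal_path pair → Spec_get_diagonal_path pair (get_diagonal_path pair)

-- ===== LEMMAS AND PROOFS =====
lemma pvAltLoop_eq_map (d : Nat) (x2 xi yi x y : Int)
    (hxi : xi = 1 ∨ xi = -1) (hx : x + d * xi = x2) :
    pvAltLoop (d + 1) x2 xi yi x y =
      (List.range (d + 1)).map (fun k : Nat => (x + (k : Int) * xi, y + (k : Int) * yi)) := by
  induction d generalizing x y with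
  | zero =>
    have : x = x2 := by simpa using hx
    simp [pvAltLoop, this]
  | succ d ih =>
    have hne : x ≠ x2 := by rcases hxi with h | h <;> subst h <;> push_cast at hx <;> omega
    have hx' : (x + xi) + d * xi = x2 := by push_cast at hx ⊢; linarith [hx]
    rw [pvAltLoop, if_neg hne, List.range_succ_eq_map, List.map_cons,
      ih (x + xi) (y + yi) hx']
    congr 1
    · simp
    rw [List.map_map]
    apply List.map_congr_left
    intro k _
    simp only [Function.comp, Nat.succ_eq_add_one]
    push_cast
    exact Prod.ext (by ring) (by ring)

lemma pvMap_pyRange_eq (d : Nat) (f : Int → Int × Int) :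
    (PySem.List.pyRange 0 (d + 1) 1).map f
      = (List.range (d + 1)).map (fun k : Nat => f (k : Int)) := by
  rw [show ((d : Int) + 1) = ((d + 1 : Nat) : Int) by push_cast; ring,
    PySem.List.pyRange_zero_natCast, List.map_map]
  rfl

-- ===== VERDICT (by name: the statement is the Claim_ definition above) =====
theorem get_diagonal_path_spec : Claim_equal_get_diagonal_path := by
  intro pair _
  unfold Spec_get_diagonal_path get_diagonal_path get_diagonal_path_alt
  obtain ⟨⟨x1, y1⟩, ⟨x2, y2⟩⟩ := pair
  simp only
  set xi : Int := if x1 < x2 then 1 else -1 with hxi_def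
  have hxi : xi = 1 ∨ xi = -1 := by rw [hxi_def]; split <;> simp
  have hx : x1 + ((x1 - x2).natAbs : Int) * xi = x2 := by
    rw [hxi_def]; split <;> omega
  rw [pvMap_pyRange_eq, pvAltLoop_eq_map (x1 - x2).natAbs x2 xi _ x1 y1 hxi hx]
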